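-- pv_equiv track=rewrite | github.com/remichoiselat20-ai/Projet_Poudelard | utils/input_utils.py | est_entier
-- ===== SOURCE A (Python) =====
-- def est_entier(s):
--     if s == "":
--         return False
--     if s[0] == "-":
--         if len(s) == 1:
--             return False
--         s = s[1:]
--     for c in s:
--         if c < '0' or c > '9':
--             return False
--
--     return True
-- ===== SOURCE B (Python) =====
-- import re
--
-- _INT_RE = re.compile(r'-?[0-9]+')
--
-- def est_entier(s):
--     return bool(_INT_RE.fullmatch(s))
-- ===== Notes on version B (the rewrite author's own statement) =====
-- stated objective: idiomatic
-- what changed: Replaces the hand-written sign-strip plus character-by-character early-exit scan with a single compiled regular-expression fullmatch of -?[0-9]+.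
import Mathlib
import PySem

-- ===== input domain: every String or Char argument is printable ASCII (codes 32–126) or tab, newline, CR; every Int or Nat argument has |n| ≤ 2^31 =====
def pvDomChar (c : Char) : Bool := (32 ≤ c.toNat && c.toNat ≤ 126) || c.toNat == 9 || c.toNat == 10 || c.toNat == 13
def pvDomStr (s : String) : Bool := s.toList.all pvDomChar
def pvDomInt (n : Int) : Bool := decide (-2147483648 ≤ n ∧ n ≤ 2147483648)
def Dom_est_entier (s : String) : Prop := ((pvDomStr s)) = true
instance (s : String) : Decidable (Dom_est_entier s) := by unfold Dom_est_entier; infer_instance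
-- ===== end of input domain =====

-- ===== PORT A =====
-- header: B validates the same optional-minus-then-digits shape with a single regex fullmatch (idiomatic); A scans by hand.
-- for c in s: if c < '0' or c > '9': return False; return True
def estEntierLoopA : List Char → Bool
  | [] => true
  | c :: t => if c < '0' || c > '9' then false else estEntierLoopA t

def est_entier (s : String) : Bool :=
  let cs := s.toList
  if cs = [] then false
  else if cs.head! = '-' then
    if cs.length = 1 then false else estEntierLoopA (cs.drop 1)
  else estEntierLoopA cs

-- ===== PORT B =====
-- hand-written matcher for the regex -?[0-9]+ over the whole string (exact on all inputs):
-- consume an optional '-', then require one or more chars in the class [0-9].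
def estEntierDigits1 : List Char → Bool
  | [] => false
  | c :: t => ('0' ≤ c && c ≤ '9') && t.all (fun d => '0' ≤ d && d ≤ '9')

def est_entier_alt (s : String) : Bool :=
  match s.toList with
  | '-' :: rest => estEntierDigits1 rest
  | cs => estEntierDigits1 cs

-- ===== PRECONDITION & SPEC =====
def Spec_est_entier (s : String) (out : Bool) : Prop := out = est_entier_alt s
instance (s : String) (out : Bool) : Decidable (Spec_est_entier s out) := by unfold Spec_est_entier; infer_instance

-- ===== CLAIM (what is proved, stated in full; the proofs are below) =====
def Claim_equal_est_entier : Prop := ∀ (s : String), Dom_est_entier s → Spec_est_entier s (est_entier s)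

-- ===== LEMMAS AND PROOFS =====

lemma loopA_eq_all (cs : List Char) :
    estEntierLoopA cs = cs.all (fun d => '0' ≤ d && d ≤ '9') := by
  induction cs with
  | nil => rfl
  | cons c t ih =>
    rw [List.all_cons, ← ih]
    simp only [estEntierLoopA]
    by_cases h1 : c < '0'
    · simp [h1, not_le.mpr h1]
    · by_cases h2 : '9' < c
      · simp [h1, h2, not_le.mpr h2]
      · simp [h1, h2, not_lt.mp h1, not_lt.mp h2]

-- ===== VERDICT (by name: the statement is the Claim_ definition above) =====
theorem est_entier_spec : Claim_equal_est_entier := by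
  intro s _
  unfold Spec_est_entier est_entier est_entier_alt
  cases h : s.toList with
  | nil => simp [estEntierDigits1]
  | cons c t =>
    by_cases hm : c = '-'
    · subst hm
      cases t with
      | nil => simp [estEntierDigits1]
      | cons d u => simp [loopA_eq_all, estEntierDigits1, List.all_cons]
    · have hne : c :: t ≠ [] := by simp
      simp only [hne, if_false, List.head!, hm]
      split
      · next rest heq =>
        injection heq with h1 _
        exact absurd h1 hm
      · simp [loopA_eq_all, estEntierDigits1, List.all_cons]
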